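-- pv_equiv track=rewrite | github.com/PnX-SI/GeoNature | contrib/occtax/backend/utils.py | get_nomenclature_filters
-- ===== SOURCE A (Python) =====
-- counting_nomenclatures = [
--     "id_nomenclature_life_stage",
--     "id_nomenclature_sex",
--     "id_nomenclature_obj_count",
--     "id_nomenclature_type_count",
--     "id_nomenclature_valid_status",
-- ]
--
-- occ_nomenclatures = [
--     "id_nomenclature_obs_meth",
--     "id_nomenclature_bio_condition",
--     "id_nomenclature_bio_status",
--     "id_nomenclature_naturalness",
--     "id_nomenclature_exist_proof",
--     "id_nomenclature_diffusion_level",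
--     "id_nomenclature_observation_status",
--     "id_nomenclature_blurring",
--     "id_nomenclature_determination_method",
-- ]
--
-- releve_nomenclatures = ["id_nomenclature_obs_technique", "id_nomenclature_grp_typ"]
--
-- def get_nomenclature_filters(params):
--     """
--         return all the nomenclatures from query paramters
--         filters by table
--     """
--     counting_filters = []
--     occurrence_filters = []
--     releve_filters = []
--
--     for p in params:
--         if p[:2] == "id":
--             if p in counting_nomenclatures:
--                 counting_filters.append(p)
--             elif p in occ_nomenclatures:
--                 occurrence_filters.append(p)
--             elif p in releve_nomenclatures:
--                 releve_filters.append(p)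
--     return releve_filters, occurrence_filters, counting_filters
-- ===== SOURCE B (Python) =====
-- counting_nomenclatures = [
--     "id_nomenclature_life_stage",
--     "id_nomenclature_sex",
--     "id_nomenclature_obj_count",
--     "id_nomenclature_type_count",
--     "id_nomenclature_valid_status",
-- ]
--
-- occ_nomenclatures = [
--     "id_nomenclature_obs_meth",
--     "id_nomenclature_bio_condition",
--     "id_nomenclature_bio_status",
--     "id_nomenclature_naturalness",
--     "id_nomenclature_exist_proof",
--     "id_nomenclature_diffusion_level",
--     "id_nomenclature_observation_status",
--     "id_nomenclature_blurring",
--     "id_nomenclature_determination_method",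
-- ]
--
-- releve_nomenclatures = ["id_nomenclature_obs_technique", "id_nomenclature_grp_typ"]
--
--
-- def get_nomenclature_filters(params):
--     """Bucket query parameters into (releve, occurrence, counting) nomenclature filters."""
--     return (
--         [p for p in params if p in releve_nomenclatures],
--         [p for p in params if p in occ_nomenclatures],
--         [p for p in params if p in counting_nomenclatures],
--     )
-- ===== Notes on version B (the rewrite author's own statement) =====
-- stated objective: simpler
-- what changed: Replaced the single accumulating loop with nested prefix/membership branches by three independent membership-filter comprehensions (the p[:2]=='id' guard is redundant since every list member starts with 'id', and the three constant lists are pairwise disjoint so branch order is irrelevant).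
import Mathlib
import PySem

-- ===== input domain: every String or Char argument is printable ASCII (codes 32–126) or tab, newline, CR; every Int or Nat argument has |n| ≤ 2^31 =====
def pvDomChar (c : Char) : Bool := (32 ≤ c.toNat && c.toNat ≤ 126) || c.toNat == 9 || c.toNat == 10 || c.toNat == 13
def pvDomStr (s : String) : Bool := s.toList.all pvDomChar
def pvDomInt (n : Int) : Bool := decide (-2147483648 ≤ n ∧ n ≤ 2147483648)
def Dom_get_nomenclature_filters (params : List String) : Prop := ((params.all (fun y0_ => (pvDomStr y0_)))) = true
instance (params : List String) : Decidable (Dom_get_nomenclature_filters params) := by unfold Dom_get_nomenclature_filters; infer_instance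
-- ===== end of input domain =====

-- B replaces A's single accumulating loop (prefix guard + nested membership branches)
-- by three independent membership filters; objective: simpler.

def counting_nomenclatures : List String := [
  "id_nomenclature_life_stage",
  "id_nomenclature_sex",
  "id_nomenclature_obj_count",
  "id_nomenclature_type_count",
  "id_nomenclature_valid_status"]

def occ_nomenclatures : List String := [
  "id_nomenclature_obs_meth",
  "id_nomenclature_bio_condition",
  "id_nomenclature_bio_status",
  "id_nomenclature_naturalness",
  "id_nomenclature_exist_proof",
  "id_nomenclature_diffusion_level",
  "id_nomenclature_observation_status",
  "id_nomenclature_blurring",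
  "id_nomenclature_determination_method"]

def releve_nomenclatures : List String := ["id_nomenclature_obs_technique", "id_nomenclature_grp_typ"]

-- ===== PORT A =====
-- the loop body: one step per parameter, state = (counting_filters, occurrence_filters, releve_filters)
def pvStepA (acc : List String × List String × List String) (p : String) :
    List String × List String × List String :=
  -- p[:2] == "id" ported as PySem slice on the character list
  if PySem.List.slice p.toList none (some 2) = "id".toList then
    if counting_nomenclatures.contains p then (acc.1 ++ [p], acc.2.1, acc.2.2)
    else if occ_nomenclatures.contains p then (acc.1, acc.2.1 ++ [p], acc.2.2)
    else if releve_nomenclatures.contains p then (acc.1, acc.2.1, acc.2.2 ++ [p])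
    else acc
  else acc

def get_nomenclature_filters (params : List String) : List String × List String × List String :=
  let r := params.foldl pvStepA ([], [], [])
  (r.2.2, r.2.1, r.1)

-- ===== PORT B =====
def get_nomenclature_filters_alt (params : List String) : List String × List String × List String :=
  (params.filter (fun p => releve_nomenclatures.contains p),
   params.filter (fun p => occ_nomenclatures.contains p),
   params.filter (fun p => counting_nomenclatures.contains p))

-- ===== PRECONDITION & SPEC =====
def Spec_get_nomenclature_filters (params : List String) (out : List String × List String × List String) : Prop := out = get_nomenclature_filters_alt params
instance (params : List String) (out : List String × List String × List String) : Decidable (Spec_get_nomenclature_filters params out) := by unfold Spec_get_nomenclature_filters; infer_instance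

-- ===== CLAIM (what is proved, stated in full; the proofs are below) =====
def Claim_equal_get_nomenclature_filters : Prop := ∀ (params : List String), Dom_get_nomenclature_filters params → Spec_get_nomenclature_filters params (get_nomenclature_filters params)

-- ===== LEMMAS AND PROOFS =====

-- every member of any of the three lists starts with "id", and the lists are pairwise disjoint
lemma counting_facts {p : String} (h : p ∈ counting_nomenclatures) :
    PySem.List.slice p.toList none (some 2) = "id".toList ∧
    p ∉ occ_nomenclatures ∧ p ∉ releve_nomenclatures := by
  simp only [counting_nomenclatures, List.mem_cons, List.not_mem_nil, or_false] at h
  rcases h with rfl | rfl | rfl | rfl | rfl <;> exact ⟨by decide, by decide, by decide⟩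

lemma occ_facts {p : String} (h : p ∈ occ_nomenclatures) :
    PySem.List.slice p.toList none (some 2) = "id".toList ∧
    p ∉ counting_nomenclatures ∧ p ∉ releve_nomenclatures := by
  simp only [occ_nomenclatures, List.mem_cons, List.not_mem_nil, or_false] at h
  rcases h with rfl | rfl | rfl | rfl | rfl | rfl | rfl | rfl | rfl <;>
    exact ⟨by decide, by decide, by decide⟩

lemma releve_facts {p : String} (h : p ∈ releve_nomenclatures) :
    PySem.List.slice p.toList none (some 2) = "id".toList ∧
    p ∉ counting_nomenclatures ∧ p ∉ occ_nomenclatures := by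
  simp only [releve_nomenclatures, List.mem_cons, List.not_mem_nil, or_false] at h
  rcases h with rfl | rfl <;> exact ⟨by decide, by decide, by decide⟩

lemma loopA_eq (params : List String) (cf of_ rf : List String) :
    params.foldl pvStepA (cf, of_, rf) =
      (cf ++ params.filter (fun p => counting_nomenclatures.contains p),
       of_ ++ params.filter (fun p => occ_nomenclatures.contains p),
       rf ++ params.filter (fun p => releve_nomenclatures.contains p)) := by
  induction params generalizing cf of_ rf with
  | nil => simp [List.filter]
  | cons p rest ih =>
    show List.foldl pvStepA (pvStepA (cf, of_, rf) p) rest = _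
    by_cases hc : p ∈ counting_nomenclatures
    · obtain ⟨hid, ho, hr⟩ := counting_facts hc
      simp [pvStepA, hid, hc, ih, List.filter_cons, ho, hr]
    · by_cases ho : p ∈ occ_nomenclatures
      · obtain ⟨hid, hc', hr⟩ := occ_facts ho
        simp [pvStepA, hid, hc, ho, ih, hr]
      · by_cases hr : p ∈ releve_nomenclatures
        · obtain ⟨hid, hc', ho'⟩ := releve_facts hr
          simp [pvStepA, hid, hc, ho, hr, ih]
        · by_cases hid : PySem.List.slice p.toList none (some 2) = "id".toList <;>
            simp [pvStepA, hid, hc, ho, hr, ih]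

-- ===== VERDICT (by name: the statement is the Claim_ definition above) =====
theorem get_nomenclature_filters_spec : Claim_equal_get_nomenclature_filters := by
  intro params _
  show _ = _
  simp [get_nomenclature_filters, get_nomenclature_filters_alt, loopA_eq]
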